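-- pv_equiv track=rewrite | github.com/pradhyumk/VirusTotal-File-Scan-Bot | VirusTotalAVBot/modules/virustotal.py | simplifiedview
-- ===== SOURCE A (Python) =====
-- def simplifiedview(av_data: dict, filehash: str) -> str:
--     """Builds and returns a simplified string containing basic information about the analysis"""
--
--     neg_detections = 0
--     pos_detections = 0
--     error_detections = 0
--
--     for engine in av_data:
--         if av_data[engine]['category'] == 'malicious' or av_data[engine]['category'] == 'suspicious':
--             neg_detections += 1
--         elif av_data[engine]['category'] == 'undetected':
--             pos_detections += 1
--         elif av_data[engine]['category'] == 'timeout' or av_data[engine]['category'] == 'type-unsupported' \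
--                 or av_data[engine]['category'] == 'failure':
--             error_detections += 1
--
--     vt_url = f'https://www.virustotal.com/gui/file/{filehash}'
--
--     response = f"__VirusTotal Analysis Summary__:\n\nHash: `{filehash}`\n\nLink: [Click Here]({vt_url})\n\n❌" \
--                f" **Negative: {neg_detections}**\n\n✅ Positive: {pos_detections}\n\n⚠ " \
--                f"Error/Unsupported File: {error_detections}"
--
--     return response
-- ===== SOURCE B (Python) =====
-- def simplifiedview(av_data: dict, filehash: str) -> str:
--     """Builds and returns a simplified string containing basic information about the analysis"""
--
--     cats = [engine_result['category'] for engine_result in av_data.values()]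
--
--     neg_detections = cats.count('malicious') + cats.count('suspicious')
--     pos_detections = cats.count('undetected')
--     error_detections = cats.count('timeout') + cats.count('type-unsupported') \
--         + cats.count('failure')
--
--     vt_url = f'https://www.virustotal.com/gui/file/{filehash}'
--
--     return (f"__VirusTotal Analysis Summary__:\n\nHash: `{filehash}`\n\nLink: [Click Here]({vt_url})\n\n❌"
--             f" **Negative: {neg_detections}**\n\n✅ Positive: {pos_detections}\n\n⚠ "
--             f"Error/Unsupported File: {error_detections}")
-- ===== Notes on version B (the rewrite author's own statement) =====
-- stated objective: alternative
-- what changed: Replaces A's per-engine branch dispatch with a project-then-aggregate decomposition: one pass extracts all category strings, and the three tallies are derived sums of list counts over that table.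
import Mathlib
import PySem

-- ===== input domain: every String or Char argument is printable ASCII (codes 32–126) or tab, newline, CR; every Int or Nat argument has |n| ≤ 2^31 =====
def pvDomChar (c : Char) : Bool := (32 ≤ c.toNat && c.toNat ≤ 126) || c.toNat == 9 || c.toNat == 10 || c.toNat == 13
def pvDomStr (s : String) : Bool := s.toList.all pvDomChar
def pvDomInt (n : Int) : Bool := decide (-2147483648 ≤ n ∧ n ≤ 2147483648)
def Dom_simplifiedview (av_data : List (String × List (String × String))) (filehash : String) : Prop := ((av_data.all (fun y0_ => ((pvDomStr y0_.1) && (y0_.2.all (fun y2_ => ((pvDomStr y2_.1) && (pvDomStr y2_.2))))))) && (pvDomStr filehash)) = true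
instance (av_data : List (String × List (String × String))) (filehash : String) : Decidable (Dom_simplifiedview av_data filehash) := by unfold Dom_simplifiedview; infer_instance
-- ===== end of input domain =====

-- B counts detection categories by projecting all categories once and aggregating with list counts,
-- instead of A's per-engine branch dispatch; objective: alternative decomposition, same cost.

-- ===== PORT A =====
-- av_data[engine]['category'] : under Pre_ the inner lookup is some; the none branch is unreachable inside Pre_.
def pvCatA (d : PySem.Dict String (List (String × String))) (engine : String) : Option String :=
  (PySem.Dict.ofList (d.getD engine [])).get? "category"

def simplifiedview (av_data : List (String × List (String × String))) (filehash : String) : String :=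
  let d := PySem.Dict.ofList av_data
  let counts : Int × Int × Int :=
    d.keys.foldl (fun acc engine =>
      match pvCatA d engine with
      | some c =>
        if c = "malicious" ∨ c = "suspicious" then (acc.1 + 1, acc.2.1, acc.2.2)
        else if c = "undetected" then (acc.1, acc.2.1 + 1, acc.2.2)
        else if c = "timeout" ∨ c = "type-unsupported" ∨ c = "failure" then (acc.1, acc.2.1, acc.2.2 + 1)
        else acc
      | none => acc) (0, 0, 0)
  let vt_url := "https://www.virustotal.com/gui/file/" ++ filehash
  "__VirusTotal Analysis Summary__:\n\nHash: `" ++ filehash ++ "`\n\nLink: [Click Here](" ++ vt_url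
    ++ ")\n\n❌ **Negative: " ++ PySem.Int.toStr counts.1 ++ "**\n\n✅ Positive: "
    ++ PySem.Int.toStr counts.2.1 ++ "\n\n⚠ Error/Unsupported File: " ++ PySem.Int.toStr counts.2.2

-- ===== PORT B =====
def simplifiedview_alt (av_data : List (String × List (String × String))) (filehash : String) : String :=
  let cats := (PySem.Dict.ofList av_data).values.map
    (fun er => ((PySem.Dict.ofList er).get? "category").getD "")
  let neg_detections : Int := PySem.List.count cats "malicious" + PySem.List.count cats "suspicious"
  let pos_detections : Int := PySem.List.count cats "undetected"
  let error_detections : Int := PySem.List.count cats "timeout" + PySem.List.count cats "type-unsupported"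
    + PySem.List.count cats "failure"
  let vt_url := "https://www.virustotal.com/gui/file/" ++ filehash
  "__VirusTotal Analysis Summary__:\n\nHash: `" ++ filehash ++ "`\n\nLink: [Click Here](" ++ vt_url
    ++ ")\n\n❌ **Negative: " ++ PySem.Int.toStr neg_detections ++ "**\n\n✅ Positive: "
    ++ PySem.Int.toStr pos_detections ++ "\n\n⚠ Error/Unsupported File: " ++ PySem.Int.toStr error_detections

-- ===== PRECONDITION & SPEC =====
-- Pre_ excludes inputs where some engine's result dict lacks the key 'category': there A (and B) raise KeyError.
def Pre_simplifiedview (av_data : List (String × List (String × String))) (filehash : String) : Prop :=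
  ∀ er ∈ (PySem.Dict.ofList av_data).values, (PySem.Dict.ofList er).contains "category" = true
instance (av_data : List (String × List (String × String))) (filehash : String) : Decidable (Pre_simplifiedview av_data filehash) := by unfold Pre_simplifiedview; infer_instance

def pvWitness_simplifiedview : (List (String × List (String × String))) × String :=
  ([("Avast", [("category", "malicious")]), ("ClamAV", [("category", "undetected")])], "abc123")

def Spec_simplifiedview (av_data : List (String × List (String × String))) (filehash : String) (out : String) : Prop := out = simplifiedview_alt av_data filehash
instance (av_data : List (String × List (String × String))) (filehash : String) (out : String) : Decidable (Spec_simplifiedview av_data filehash out) := by unfold Spec_simplifiedview; infer_instance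

-- ===== CLAIM (what is proved, stated in full; the proofs are below) =====
def Claim_equal_simplifiedview : Prop := ∀ (av_data : List (String × List (String × String))) (filehash : String), Dom_simplifiedview av_data filehash → Pre_simplifiedview av_data filehash → Spec_simplifiedview av_data filehash (simplifiedview av_data filehash)

-- ===== LEMMAS AND PROOFS =====

-- A's fold over a category list equals B's count-based aggregation.
theorem pvFold_counts (cs : List String) (n p e : Int) :
    cs.foldl (fun acc c =>
      if c = "malicious" ∨ c = "suspicious" then (acc.1 + 1, acc.2.1, acc.2.2)
      else if c = "undetected" then (acc.1, acc.2.1 + 1, acc.2.2)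
      else if c = "timeout" ∨ c = "type-unsupported" ∨ c = "failure" then (acc.1, acc.2.1, acc.2.2 + 1)
      else acc) ((n, p, e) : Int × Int × Int)
    = (n + PySem.List.count cs "malicious" + PySem.List.count cs "suspicious",
       p + PySem.List.count cs "undetected",
       e + PySem.List.count cs "timeout" + PySem.List.count cs "type-unsupported"
         + PySem.List.count cs "failure") := by
  induction cs generalizing n p e with
  | nil => simp [PySem.List.count_eq]
  | cons c rest ih =>
    simp only [List.foldl_cons]
    by_cases h1 : c = "malicious" ∨ c = "suspicious"
    · rw [if_pos h1, ih]
      rcases h1 with h | h <;> subst h <;>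
        simp [PySem.List.count_eq] <;> ring
    · rw [if_neg h1]
      by_cases h2 : c = "undetected"
      · rw [if_pos h2, ih]; subst h2
        simp [PySem.List.count_eq]
        ring
      · rw [if_neg h2]
        by_cases h3 : c = "timeout" ∨ c = "type-unsupported" ∨ c = "failure"
        · rw [if_pos h3, ih]
          rcases h3 with h | h | h <;> subst h <;>
            simp [PySem.List.count_eq] <;> ring
        · rw [if_neg h3, ih]
          rw [not_or] at h1
          rw [not_or, not_or] at h3
          obtain ⟨hm, hs⟩ := h1
          obtain ⟨ht, hu, hf⟩ := h3
          simp [PySem.List.count_eq, hm, hs, h2, ht, hu, hf]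

-- ===== VERDICT (by name: the statement is the Claim_ definition above) =====
theorem simplifiedview_spec : Claim_equal_simplifiedview := by
  intro av_data filehash _hdom hpre
  unfold Spec_simplifiedview simplifiedview simplifiedview_alt
  set d := PySem.Dict.ofList av_data with hd
  have hnd : d.keys.Nodup := PySem.Dict.nodup_keys_ofList av_data
  have hvals : d.values = d.keys.map (fun k => d.getD k []) :=
    PySem.Dict.values_eq_map_keys d hnd []
  have hcat : ∀ k ∈ d.keys, pvCatA d k = some (((PySem.Dict.ofList (d.getD k [])).get? "category").getD "") := by
    intro k hk
    have hmem : d.getD k [] ∈ d.values := by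
      rw [hvals]; exact List.mem_map_of_mem hk
    have := hpre _ hmem
    unfold pvCatA
    rcases ho : (PySem.Dict.ofList (d.getD k [])).get? "category" with _ | v
    · rw [PySem.Dict.contains_eq_isSome_get?, ho] at this; simp at this
    · simp
  -- rewrite A's fold over keys into a fold over the mapped category list
  have hfold : d.keys.foldl (fun acc engine =>
      match pvCatA d engine with
      | some c =>
        if c = "malicious" ∨ c = "suspicious" then (acc.1 + 1, acc.2.1, acc.2.2)
        else if c = "undetected" then (acc.1, acc.2.1 + 1, acc.2.2)
        else if c = "timeout" ∨ c = "type-unsupported" ∨ c = "failure" then (acc.1, acc.2.1, acc.2.2 + 1)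
        else acc
      | none => acc) ((0, 0, 0) : Int × Int × Int)
      = (d.keys.map (fun k => ((PySem.Dict.ofList (d.getD k [])).get? "category").getD "")).foldl
        (fun acc c =>
          if c = "malicious" ∨ c = "suspicious" then (acc.1 + 1, acc.2.1, acc.2.2)
          else if c = "undetected" then (acc.1, acc.2.1 + 1, acc.2.2)
          else if c = "timeout" ∨ c = "type-unsupported" ∨ c = "failure" then (acc.1, acc.2.1, acc.2.2 + 1)
          else acc) ((0, 0, 0) : Int × Int × Int) := by
    rw [List.foldl_map]
    apply PySem.List.foldl_congr_mem
    intro acc k hk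
    rw [hcat k hk]
  have hcats : d.values.map (fun er => ((PySem.Dict.ofList er).get? "category").getD "")
      = d.keys.map (fun k => ((PySem.Dict.ofList (d.getD k [])).get? "category").getD "") := by
    rw [hvals, List.map_map]; rfl
  simp only [hfold, pvFold_counts, hcats, zero_add]
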